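-- pv_equiv track=rewrite | github.com/Aasthaengg/IBMdataset | Python_codes/p03959/s926377683.py | solve
-- ===== SOURCE A (Python) =====
-- def solve(n, aaa, bbb):
--     # 最大値が更新された=その山の高さは決定
--     max_heights = [0] * n
--     fixed = [False] * n
--     MOD = 10 ** 9 + 7
--
--     h = 0
--     for i, a in enumerate(aaa):
--         if h != a:
--             max_heights[i] = a
--             fixed[i] = True
--         else:
--             max_heights[i] = a
--         h = a
--
--     h = 0
--     for i, b in reversed(list(enumerate(bbb))):
--         if h != b:
--             if max_heights[i] < b:
--                 return 0
--             if fixed[i] and max_heights[i] != b: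
--                 return 0
--             max_heights[i] = b
--             fixed[i] = True
--         else:
--             max_heights[i] = min(max_heights[i], b)
--         h = b
--
--     ans = 1
--     for h, f in zip(max_heights, fixed):
--         if f:
--             continue
--         ans = ans * h % MOD
--     return ans
-- ===== SOURCE B (Python) =====
-- def solve(n, aaa, bbb):
--     # One pass over the n positions in O(1) extra space: read each constraint
--     # directly from the input lists (positions past a list's end are
--     # unconstrained on that side) instead of building state arrays.
--     MOD = 10 ** 9 + 7
--     la, lb = len(aaa), len(bbb)
--     ans = 1
--     for i in range(n):
--         a = aaa[i] if i < la else 0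
--         da = i < la and a != (aaa[i - 1] if i else 0)
--         if i < lb:
--             b = bbb[i]
--             if b != (bbb[i + 1] if i + 1 < lb else 0):
--                 if a < b:
--                     return 0
--                 if da and a != b:
--                     return 0
--             elif not da:
--                 ans = ans * min(a, b) % MOD
--         elif not da:
--             ans = ans * a % MOD
--     return ans
-- ===== Notes on version B (the rewrite author's own statement) =====
-- stated objective: simpler
-- what changed: A builds max_heights/fixed state arrays in a forward pass, mutates them in a backward pass with early returns, then reduces them in a third pass; B is a single forward loop over the n positions in O(1) extra space, reading each prefix/suffix constraint directly from the input lists (a position past a list's end is simply unconstrained on that side) and carrying only the running product.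
import Mathlib
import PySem

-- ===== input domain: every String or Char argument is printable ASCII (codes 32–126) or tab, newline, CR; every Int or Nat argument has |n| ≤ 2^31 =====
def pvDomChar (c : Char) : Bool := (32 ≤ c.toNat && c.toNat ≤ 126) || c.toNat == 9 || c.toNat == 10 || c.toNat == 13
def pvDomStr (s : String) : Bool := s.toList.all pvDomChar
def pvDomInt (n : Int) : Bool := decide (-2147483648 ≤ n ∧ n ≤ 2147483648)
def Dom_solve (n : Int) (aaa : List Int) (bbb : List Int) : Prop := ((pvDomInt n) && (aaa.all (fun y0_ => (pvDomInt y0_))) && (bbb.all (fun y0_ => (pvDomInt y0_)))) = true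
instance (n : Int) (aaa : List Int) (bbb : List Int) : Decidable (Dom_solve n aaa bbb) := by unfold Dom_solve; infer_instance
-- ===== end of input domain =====

-- B replaces A's three passes over mutable max_heights/fixed arrays by one index loop in
-- O(1) extra space reading the constraints straight from the input lists (objective:
-- alternative decomposition; return-value equivalence on Pre_).

-- ===== PORT A =====
-- 'for i, b in reversed(list(enumerate(bbb)))' with the early 'return 0' modelled as none.
-- pyGetD/pySetD are in range on every input admitted by Pre_solve (Python raises outside it).
def solveBack : List (Int × Int) → List Int → List Bool → Int → Option (List Int × List Bool)
  | [], mh, fx, _ => some (mh, fx)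
  | (i, b) :: rest, mh, fx, h =>
    if h ≠ b then
      if PySem.List.pyGetD mh i 0 < b then none
      else if PySem.List.pyGetD fx i false ∧ PySem.List.pyGetD mh i 0 ≠ b then none
      else solveBack rest (PySem.List.pySetD mh i b) (PySem.List.pySetD fx i true) b
    else solveBack rest (PySem.List.pySetD mh i (min (PySem.List.pyGetD mh i 0) b)) fx b

def solve (n : Int) (aaa : List Int) (bbb : List Int) : Int :=
  let mh0 : List Int := PySem.List.pyRepeat [(0 : Int)] n
  let fx0 : List Bool := PySem.List.pyRepeat [false] n
  let MOD : Int := 10 ^ 9 + 7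
  let s1 := (PySem.List.enumerate aaa 0).foldl
    (fun (st : List Int × List Bool × Int) ia =>
      if st.2.2 ≠ ia.2 then
        (PySem.List.pySetD st.1 ia.1 ia.2, PySem.List.pySetD st.2.1 ia.1 true, ia.2)
      else
        (PySem.List.pySetD st.1 ia.1 ia.2, st.2.1, ia.2))
    (mh0, fx0, 0)
  match solveBack ((PySem.List.enumerate bbb 0).reverse) s1.1 s1.2.1 0 with
  | none => 0
  | some (mh, fx) =>
      (mh.zip fx).foldl (fun ans p => if p.2 then ans else PySem.Int.mod (ans * p.1) MOD) 1

-- ===== PORT B =====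
-- Source B's 'for i in range(n)' loop; the guarded accesses 'aaa[i] if i < la else 0' and
-- 'bbb[i+1] if i+1 < lb else 0' are List.getD under their guard (exact: index in range there)
def solveLoopB (aaa bbb : List Int) (mod_ : Int) (la lb : Nat) : List Nat → Int → Int
  | [], ans => ans
  | i :: rest, ans =>
    let a : Int := if i < la then aaa.getD i 0 else 0
    let da := i < la ∧ a ≠ (if i = 0 then 0 else aaa.getD (i - 1) 0)
    if i < lb then
      let b := bbb.getD i 0
      if b ≠ (if i + 1 < lb then bbb.getD (i + 1) 0 else 0) then
        if a < b then 0
        else if da ∧ a ≠ b then 0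
        else solveLoopB aaa bbb mod_ la lb rest ans
      else if ¬ da then solveLoopB aaa bbb mod_ la lb rest (PySem.Int.mod (ans * min a b) mod_)
      else solveLoopB aaa bbb mod_ la lb rest ans
    else if ¬ da then solveLoopB aaa bbb mod_ la lb rest (PySem.Int.mod (ans * a) mod_)
    else solveLoopB aaa bbb mod_ la lb rest ans

def solve_alt (n : Int) (aaa : List Int) (bbb : List Int) : Int :=
  let MOD : Int := 10 ^ 9 + 7
  -- range(n) is List.range n.toNat (exact: empty for n ≤ 0)
  solveLoopB aaa bbb MOD aaa.length bbb.length (List.range n.toNat) 1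

-- ===== PRECONDITION & SPEC =====
-- Pre_ admits exactly the inputs where A returns: both lists fit into the [0]*n arrays
-- (len(aaa) <= max(n,0) and len(bbb) <= max(n,0)); outside it A raises IndexError.
def Pre_solve (n : Int) (aaa : List Int) (bbb : List Int) : Prop :=
  (aaa.length : Int) ≤ max n 0 ∧ (bbb.length : Int) ≤ max n 0
instance (n : Int) (aaa : List Int) (bbb : List Int) : Decidable (Pre_solve n aaa bbb) := by
  unfold Pre_solve; infer_instance

def pvWitness_solve : Int × List Int × List Int := (2, [1, 2], [2, 1])

def Spec_solve (n : Int) (aaa : List Int) (bbb : List Int) (out : Int) : Prop := out = solve_alt n aaa bbb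
instance (n : Int) (aaa : List Int) (bbb : List Int) (out : Int) : Decidable (Spec_solve n aaa bbb out) := by unfold Spec_solve; infer_instance

-- ===== CLAIM (what is proved, stated in full; the proofs are below) =====
def Claim_equal_solve : Prop := ∀ (n : Int) (aaa : List Int) (bbb : List Int), Dom_solve n aaa bbb → Pre_solve n aaa bbb → Spec_solve n aaa bbb (solve n aaa bbb)

-- ===== LEMMAS AND PROOFS =====

-- fixed[] after A's first loop on the real part of aaa
def fixOf : Int → List Int → List Bool
  | _, [] => []
  | h, a :: t => decide (h ≠ a) :: fixOf a t

-- fixed[] on the padded list, with presence flags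
def fixTag : List Bool → List Int → Int → List Bool
  | g :: gs, a :: t, h => (g && decide (h ≠ a)) :: fixTag gs t a
  | _, _, _ => []

-- the per-index action of A's backward loop (nb = the b-value one position to the right)
def stepi (m : Int) (f : Bool) (b nb : Int) : Option (Int × Bool) :=
  if nb ≠ b then
    if m < b then none
    else if f ∧ m ≠ b then none
    else some (b, true)
  else some (min m b, f)

-- A's backward loop as a forward structural recursion (h = sentinel beyond the right end)
def chainH : List Int → List Bool → List Int → Int → Option (List Int × List Bool)
  | m :: M, f :: F, b :: bs, h =>
    match stepi m f b (bs.headD h), chainH M F bs h with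
    | some (m', f'), some (M', F') => some (m' :: M', f' :: F')
    | _, _ => none
  | _, _, _, _ => some ([], [])

-- intermediate form of B: the same forward pass over pre-zipped padded position records
def solveFwdB (mod_ : Int) : List (Int × Bool × Int × Bool × Bool) → Int → Int → Int
  | [], ans, _ => ans
  | (a, aOk, b, bOk, pk) :: rest, ans, prev =>
    let da := aOk = true ∧ a ≠ prev
    if bOk then
      if pk then
        if a < b then 0
        else if da ∧ a ≠ b then 0
        else solveFwdB mod_ rest ans a
      else if ¬ da then solveFwdB mod_ rest (PySem.Int.mod (ans * min a b) mod_) a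
      else solveFwdB mod_ rest ans a
    else if ¬ da then solveFwdB mod_ rest (PySem.Int.mod (ans * a) mod_) a
    else solveFwdB mod_ rest ans a

-- suffix-peak flags of the padded b-list
def peakOf (l : List Int) : List Bool := (l.zip (l.drop 1 ++ [0])).map (fun p => decide (p.1 ≠ p.2))

theorem getAt {α : Type} (p : List α) (x : α) (l : List α) (d : α) :
    (p ++ x :: l).getD p.length d = x := by
  induction p with
  | nil => rfl
  | cons y p ih => simpa using ih

theorem setAt {α : Type} (p : List α) (x : α) (l : List α) (v : α) :
    (p ++ x :: l).set p.length v = p ++ v :: l := by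
  induction p with
  | nil => rfl
  | cons y p ih => simpa using ih

theorem length_fixOf (h : Int) (as : List Int) : (fixOf h as).length = as.length := by
  induction as generalizing h with
  | nil => rfl
  | cons a t ih => simp [fixOf, ih]

theorem fixTag_false (k : Nat) : ∀ (h : Int),
    fixTag (List.replicate k false) (List.replicate k 0) h = List.replicate k false := by
  induction k with
  | zero => intro h; rfl
  | succ k ih => intro h; simp [List.replicate_succ, fixTag, ih]

theorem fixpad (as : List Int) : ∀ (k : Nat) (h : Int),
    fixOf h as ++ List.replicate k false
    = fixTag (List.replicate as.length true ++ List.replicate k false)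
        (as ++ List.replicate k 0) h := by
  induction as with
  | nil => intro k h; simp [fixOf, fixTag_false]
  | cons a t ih => intro k h; simp [fixOf, List.replicate_succ, fixTag, ih]

theorem loop1 (as : List Int) : ∀ (mhp : List Int) (fxp : List Bool) (h : Int) (k : Nat),
    fxp.length = mhp.length →
    (PySem.List.enumerate as (mhp.length : Int)).foldl
      (fun (st : List Int × List Bool × Int) ia =>
        if st.2.2 ≠ ia.2 then
          (PySem.List.pySetD st.1 ia.1 ia.2, PySem.List.pySetD st.2.1 ia.1 true, ia.2)
        else
          (PySem.List.pySetD st.1 ia.1 ia.2, st.2.1, ia.2))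
      (mhp ++ List.replicate (as.length + k) 0, fxp ++ List.replicate (as.length + k) false, h)
    = (mhp ++ as ++ List.replicate k 0, fxp ++ fixOf h as ++ List.replicate k false,
       as.foldl (fun _ a => a) h) := by
  induction as with
  | nil => intro mhp fxp h k _; simp [PySem.List.enumerate, fixOf]
  | cons a t ih =>
    intro mhp fxp h k hlen
    rw [PySem.List.enumerate_cons]
    simp only [List.foldl_cons, List.length_cons, Nat.add_right_comm t.length 1 k,
      List.replicate_succ]
    have hset1 : PySem.List.pySetD (mhp ++ 0 :: List.replicate (t.length + k) 0) (mhp.length : Int) a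
        = mhp ++ a :: List.replicate (t.length + k) 0 := by
      rw [PySem.List.pySetD_natCast, setAt]
    have hset2 : PySem.List.pySetD (fxp ++ false :: List.replicate (t.length + k) false) (mhp.length : Int) true
        = fxp ++ true :: List.replicate (t.length + k) false := by
      rw [← hlen, PySem.List.pySetD_natCast, setAt]
    by_cases hne : h ≠ a
    · simp only [if_pos hne, hset1, hset2]
      have := ih (mhp ++ [a]) (fxp ++ [true]) a k (by simp [hlen])
      simp only [List.length_append, List.length_cons, List.length_nil] at this
      push_cast at this ⊢
      simpa [List.append_assoc, fixOf, hne] using this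
    · simp only [if_neg hne, hset1]
      have := ih (mhp ++ [a]) (fxp ++ [false]) a k (by simp [hlen])
      simp only [List.length_append, List.length_cons, List.length_nil] at this
      push_cast at this ⊢
      simpa [List.append_assoc, fixOf, hne] using this

theorem chainH_snoc : ∀ (bs M₀ : List Int) (F₀ : List Bool) (m b : Int) (f : Bool) (h : Int),
    M₀.length = bs.length → F₀.length = bs.length →
    chainH (M₀ ++ [m]) (F₀ ++ [f]) (bs ++ [b]) h
    = match stepi m f b h, chainH M₀ F₀ bs b with
      | some (m', f'), some (M', F') => some (M' ++ [m'], F' ++ [f'])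
      | _, _ => none := by
  intro bs
  induction bs with
  | nil =>
    intro M₀ F₀ m b f h hM hF
    rw [List.length_nil] at hM hF
    rw [List.eq_nil_of_length_eq_zero hM, List.eq_nil_of_length_eq_zero hF]
    simp only [List.nil_append, chainH, List.headD_nil]
    cases hs : stepi m f b h with
    | none => rfl
    | some p => cases p; rfl
  | cons c bs ih =>
    intro M₀ F₀ m b f h hM hF
    rcases M₀ with _ | ⟨m₀, M₀⟩; · simp at hM
    rcases F₀ with _ | ⟨f₀, F₀⟩; · simp at hF
    simp only [List.length_cons, Nat.add_right_cancel_iff] at hM hF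
    simp only [List.cons_append, chainH]
    have hhead : (bs ++ [b]).headD h = bs.headD b := by cases bs <;> rfl
    rw [hhead, ih M₀ F₀ m b f h hM hF]
    cases h1 : stepi m₀ f₀ c (bs.headD b) with
    | none =>
      cases h2 : stepi m f b h with
      | none => rfl
      | some p =>
        cases p
        cases h3 : chainH M₀ F₀ bs b with
        | none => rfl
        | some q => cases q; rfl
    | some p1 =>
      cases p1
      cases h2 : stepi m f b h with
      | none =>
        cases h3 : chainH M₀ F₀ bs b with
        | none => rfl
        | some q => cases q; rfl
      | some p2 =>
        cases p2
        cases h3 : chainH M₀ F₀ bs b with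
        | none => rfl
        | some q => cases q; rfl

theorem loop2 (bs : List Int) : ∀ (M S : List Int) (F T : List Bool) (h : Int),
    M.length = bs.length → F.length = bs.length →
    solveBack ((PySem.List.enumerate bs 0).reverse) (M ++ S) (F ++ T) h
    = match chainH M F bs h with
      | none => none
      | some (M', F') => some (M' ++ S, F' ++ T) := by
  induction bs using List.reverseRecOn with
  | nil =>
    intro M S F T h hM hF
    rw [List.length_nil] at hM hF
    rw [List.eq_nil_of_length_eq_zero hM, List.eq_nil_of_length_eq_zero hF]
    simp [PySem.List.enumerate, solveBack, chainH]
  | append_singleton bs b ih =>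
    intro M S F T h hM hF
    rw [List.length_append, List.length_cons, List.length_nil, Nat.add_zero] at hM hF
    rcases M.eq_nil_or_concat with rfl | ⟨M₀, m, rfl⟩
    · simp at hM
    rcases F.eq_nil_or_concat with rfl | ⟨F₀, f, rfl⟩
    · simp at hF
    simp only [List.concat_eq_append] at *
    rw [List.length_append, List.length_cons, List.length_nil, Nat.add_zero,
      Nat.add_right_cancel_iff] at hM hF
    have henum : (PySem.List.enumerate (bs ++ [b]) 0).reverse
        = (((bs.length : Int)), b) :: (PySem.List.enumerate bs 0).reverse := by
      simp [PySem.List.enumerate_append, PySem.List.enumerate_cons, PySem.List.enumerate_nil]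
    have eM : (M₀ ++ [m]) ++ S = M₀ ++ m :: S := by simp
    have eF : (F₀ ++ [f]) ++ T = F₀ ++ f :: T := by simp
    have hgm : PySem.List.pyGetD (M₀ ++ m :: S) ((bs.length : Int)) 0 = m := by
      rw [← hM, PySem.List.pyGetD_natCast, getAt]
    have hgf : PySem.List.pyGetD (F₀ ++ f :: T) ((bs.length : Int)) false = f := by
      rw [← hF, PySem.List.pyGetD_natCast, getAt]
    have hsm : ∀ v, PySem.List.pySetD (M₀ ++ m :: S) ((bs.length : Int)) v = M₀ ++ v :: S := by
      intro v; rw [← hM, PySem.List.pySetD_natCast, setAt]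
    have hsf : ∀ v, PySem.List.pySetD (F₀ ++ f :: T) ((bs.length : Int)) v = F₀ ++ v :: T := by
      intro v; rw [← hF, PySem.List.pySetD_natCast, setAt]
    rw [henum, eM, eF]
    rw [chainH_snoc bs M₀ F₀ m b f h hM hF]
    simp only [solveBack, hgm, hgf, stepi]
    by_cases hne : h ≠ b
    · simp only [if_pos hne]
      by_cases hlt : m < b
      · simp [hlt]
      · simp only [if_neg hlt]
        by_cases hfb : (f : Prop) ∧ m ≠ b
        · simp [hfb]
        · simp only [if_neg hfb, hsm, hsf]
          rw [ih M₀ (b :: S) F₀ (true :: T) b hM hF]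
          cases h3 : chainH M₀ F₀ bs b with
          | none => rfl
          | some q => cases q; simp
    · simp only [if_neg hne, hsm]
      rw [ih M₀ (min m b :: S) F₀ (f :: T) b hM hF]
      cases h3 : chainH M₀ F₀ bs b with
      | none => rfl
      | some q => cases q; simp

theorem peakOf_cons (b : Int) (rest : List Int) :
    peakOf (b :: rest) = decide (b ≠ rest.headD 0) :: peakOf rest := by
  cases rest <;> simp [peakOf]

theorem headD_append_replicate (bs : List Int) (k : Nat) :
    (bs ++ List.replicate k 0).headD 0 = bs.headD 0 := by
  cases bs <;> cases k <;> simp [List.replicate_succ]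

theorem chainH_cons (m : Int) (M : List Int) (f : Bool) (F : List Bool) (b : Int)
    (bs : List Int) (h : Int) :
    chainH (m :: M) (f :: F) (b :: bs) h
    = match stepi m f b (bs.headD h), chainH M F bs h with
      | some (m', f'), some (M', F') => some (m' :: M', f' :: F')
      | _, _ => none := rfl

theorem mainEquiv : ∀ (aa : List Int) (ha : List Bool) (bs : List Int) (h0 ans : Int),
    ha.length = aa.length → bs.length ≤ aa.length →
    (match chainH (aa.take bs.length) ((fixTag ha aa h0).take bs.length) bs 0 with
     | none => (0 : Int)
     | some (M', F') =>
         ((M' ++ aa.drop bs.length).zip (F' ++ (fixTag ha aa h0).drop bs.length)).foldl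
           (fun ans p => if p.2 then ans else PySem.Int.mod (ans * p.1) (10 ^ 9 + 7)) ans)
    = solveFwdB (10 ^ 9 + 7)
        (aa.zip (ha.zip ((bs ++ List.replicate (aa.length - bs.length) 0).zip
          ((List.replicate bs.length true ++ List.replicate (aa.length - bs.length) false).zip
           (peakOf (bs ++ List.replicate (aa.length - bs.length) 0)))))) ans h0 := by
  intro aa
  induction aa with
  | nil =>
    intro ha bs h0 ans _ hble
    have hbs : bs = [] := List.length_eq_zero_iff.mp (by simpa using hble)
    subst hbs
    simp [chainH, solveFwdB, fixTag]
  | cons a aa ih =>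
    intro ha bs h0 ans hha hble
    rcases ha with _ | ⟨g, ha⟩; · simp at hha
    rw [List.length_cons, List.length_cons, Nat.add_right_cancel_iff] at hha
    rcases bs with _ | ⟨b, bs⟩
    · -- no b at this position (nor at any later one)
      have hdz : (decide ((0 : Int) ≠ 0)) = false := by decide
      simp only [List.length_nil, List.take_zero, List.drop_zero, List.nil_append,
        Nat.sub_zero, chainH, List.length_cons, List.replicate_succ, List.replicate_zero]
      rw [peakOf_cons]
      have hh : ((List.replicate aa.length (0 : Int)).headD 0) = 0 := by
        cases aa <;> simp [List.replicate_succ]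
      simp only [fixTag, hh, hdz, List.nil_append, List.zip_cons_cons, List.foldl_cons,
        solveFwdB]
      simp only [Bool.false_eq_true, if_neg (by simp : ¬ (false = true))]
      by_cases hda : (g = true ∧ a ≠ h0)
      · have hf : (g && decide (h0 ≠ a)) = true := by
          rw [hda.1]; simpa using (Ne.symm hda.2)
        have IH := ih ha [] a ans hha (Nat.zero_le _)
        simp only [List.length_nil, List.take_zero, List.drop_zero, List.nil_append,
          Nat.sub_zero, chainH, List.replicate_zero] at IH
        simp only [hf]
        simpa [hda] using IH
      · have hf : (g && decide (h0 ≠ a)) = false := by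
          rcases not_and_or.mp hda with h1 | h2
          · simp [Bool.eq_false_iff.mpr h1]
          · simp [not_not.mp h2]
        have IH := ih ha [] a (PySem.Int.mod (ans * a) (10 ^ 9 + 7)) hha (Nat.zero_le _)
        simp only [List.length_nil, List.take_zero, List.drop_zero, List.nil_append,
          Nat.sub_zero, chainH, List.replicate_zero] at IH
        simp only [hf]
        simpa [hda] using IH
    · -- a real b at this position
      have hble' : bs.length ≤ aa.length := by
        simp only [List.length_cons] at hble; omega
      simp only [List.length_cons, List.take_succ_cons, List.drop_succ_cons,
        List.cons_append, List.replicate_succ, Nat.add_sub_add_right]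
      rw [peakOf_cons, headD_append_replicate]
      simp only [fixTag, List.take_succ_cons, List.drop_succ_cons, List.zip_cons_cons,
        List.foldl_cons, solveFwdB, chainH_cons, headD_append_replicate, if_true]
      by_cases hpk : bs.headD 0 ≠ b
      · have hpk' : (decide (b ≠ bs.headD 0)) = true := decide_eq_true (Ne.symm hpk)
        simp only [hpk', if_pos rfl]
        by_cases hlt : a < b
        · have hs : stepi a (g && decide (h0 ≠ a)) b (bs.headD 0) = none := by
            unfold stepi; rw [if_pos hpk, if_pos hlt]
          rw [hs]
          simp [hlt]
        · simp only [if_neg hlt]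
          by_cases hfb : ((g && decide (h0 ≠ a)) : Prop) ∧ a ≠ b
          · have hda : (g = true ∧ a ≠ h0) ∧ a ≠ b := by
              have hand : g = true ∧ (decide (h0 ≠ a)) = true := by
                have := hfb.1; simpa using this
              exact ⟨⟨hand.1, by simpa [ne_comm] using of_decide_eq_true hand.2⟩, hfb.2⟩
            have hs : stepi a (g && decide (h0 ≠ a)) b (bs.headD 0) = none := by
              simp only [stepi, if_pos hpk, if_neg hlt, if_pos hfb]
            rw [hs]
            simp [hda]
          · have hda : ¬ ((g = true ∧ a ≠ h0) ∧ a ≠ b) := by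
              intro ⟨⟨e1, e2⟩, e3⟩
              exact hfb ⟨by simp [e1, Ne.symm e2], e3⟩
            have hs : stepi a (g && decide (h0 ≠ a)) b (bs.headD 0) = some (b, true) := by
              simp only [stepi, if_pos hpk, if_neg hlt, if_neg hfb]
            rw [hs]
            simp only [if_neg (fun h => hlt h), if_neg hda]
            have IH := ih ha bs a ans hha hble'
            rw [← IH]
            cases h3 : chainH (aa.take bs.length) ((fixTag ha aa a).take bs.length) bs 0 with
            | none => simp
            | some q => cases q; simp
      · have hb : bs.headD 0 = b := not_not.mp hpk
        have hpk' : (decide (b ≠ bs.headD 0)) = false := decide_eq_false (fun h => h hb.symm)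
        have hs : stepi a (g && decide (h0 ≠ a)) b (bs.headD 0)
            = some (min a b, (g && decide (h0 ≠ a))) := by
          simp only [stepi, if_neg hpk]
        rw [hs]
        simp only [hpk', Bool.false_eq_true, if_neg (by simp : ¬ (false = true))]
        by_cases hda : (g = true ∧ a ≠ h0)
        · have hf : (g && decide (h0 ≠ a)) = true := by
            rw [hda.1]; simpa using (Ne.symm hda.2)
          simp only [hf, if_pos rfl, if_neg (by simpa using hda : ¬ ¬ (g = true ∧ a ≠ h0))]
          have IH := ih ha bs a ans hha hble'
          rw [← IH]
          cases h3 : chainH (aa.take bs.length) ((fixTag ha aa a).take bs.length) bs 0 with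
          | none => simp
          | some q => cases q; simp
        · have hf : (g && decide (h0 ≠ a)) = false := by
            rcases not_and_or.mp hda with h1 | h2
            · simp [Bool.eq_false_iff.mpr h1]
            · simp [not_not.mp h2]
          simp only [hf, Bool.false_eq_true, if_neg (by simp : ¬ (false = true)),
            if_pos (by simpa using hda)]
          have IH := ih ha bs a (PySem.Int.mod (ans * min a b) (10 ^ 9 + 7)) hha hble'
          rw [← IH]
          cases h3 : chainH (aa.take bs.length) ((fixTag ha aa a).take bs.length) bs 0 with
          | none => simp; intro h1 h2; exact absurd ⟨h1, h2⟩ hda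
          | some q => cases q; simp; intro h1 h2; exact absurd ⟨h1, h2⟩ hda

-- ===== the bridge: B's index loop equals the flag pass over the padded records =====

theorem padGet (xs : List Int) (N k : Nat) (hx : xs.length ≤ N) (hk : k < N) :
    (xs ++ List.replicate (N - xs.length) (0 : Int)).getD k 0
    = if k < xs.length then xs.getD k 0 else 0 := by
  by_cases h : k < xs.length
  · rw [if_pos h, List.getD_append _ _ _ _ h]
  · rw [if_neg h, List.getD_eq_getElem?_getD, List.getElem?_append_right (by omega),
      List.getElem?_replicate]
    split_ifs with h2 <;> simp

theorem flagGet (la N k : Nat) (hx : la ≤ N) (hk : k < N) :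
    (List.replicate la true ++ List.replicate (N - la) false).getD k false
    = decide (k < la) := by
  by_cases h : k < la
  · rw [List.getD_append _ _ _ _ (by simpa using h)]
    simp [h]
  · rw [List.getD_eq_getElem?_getD, List.getElem?_append_right (by simpa using h),
      List.getElem?_replicate]
    split_ifs with h2 <;> simp [h]

theorem peakGet : ∀ (L : List Int) (k : Nat), k < L.length →
    (peakOf L).getD k false
    = decide (L.getD k 0 ≠ (if k + 1 < L.length then L.getD (k + 1) 0 else 0)) := by
  intro L
  induction L with
  | nil => intro k hk; simp at hk
  | cons x t ih =>
    intro k hk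
    rw [peakOf_cons]
    cases k with
    | zero =>
      rcases t with _ | ⟨y, s⟩ <;> simp
    | succ k =>
      have hk' : k < t.length := by simpa using hk
      simp only [List.getD_cons_succ]
      rw [ih k hk']
      simp [List.length_cons, Nat.succ_lt_succ_iff]

theorem peakOf_length (L : List Int) : (peakOf L).length = L.length := by
  rcases L with _ | ⟨x, t⟩ <;> simp [peakOf]

theorem dropD {α : Type} (l : List α) (k : Nat) (d : α) (h : k < l.length) :
    l.drop k = l.getD k d :: l.drop (k + 1) := by
  rw [List.drop_eq_getElem_cons h, List.getD_eq_getElem l d h]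

theorem bridge (aaa bbb : List Int) (N : Nat) (hla : aaa.length ≤ N) (hlb : bbb.length ≤ N) :
    ∀ (m k : Nat) (ans : Int), k + m = N →
    solveLoopB aaa bbb (10 ^ 9 + 7) aaa.length bbb.length (List.range' k m) ans
    = solveFwdB (10 ^ 9 + 7)
        (((aaa ++ List.replicate (N - aaa.length) 0).drop k).zip
          (((List.replicate aaa.length true ++ List.replicate (N - aaa.length) false).drop k).zip
            (((bbb ++ List.replicate (N - bbb.length) 0).drop k).zip
              (((List.replicate bbb.length true ++ List.replicate (N - bbb.length) false).drop k).zip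
                ((peakOf (bbb ++ List.replicate (N - bbb.length) 0)).drop k)))))
        ans (if k = 0 then 0 else (aaa ++ List.replicate (N - aaa.length) 0).getD (k - 1) 0) := by
  intro m
  induction m with
  | zero =>
    intro k ans hkm
    have hk : k = N := by omega
    rw [hk]
    have lA : (aaa ++ List.replicate (N - aaa.length) (0 : Int)).length = N := by simp; omega
    have lH : (List.replicate aaa.length true ++ List.replicate (N - aaa.length) false).length = N := by
      simp; omega
    have lB : (bbb ++ List.replicate (N - bbb.length) (0 : Int)).length = N := by simp; omega
    have lHb : (List.replicate bbb.length true ++ List.replicate (N - bbb.length) false).length = N := by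
      simp; omega
    have lP : (peakOf (bbb ++ List.replicate (N - bbb.length) 0)).length = N := by
      rw [peakOf_length, lB]
    rw [List.drop_of_length_le (le_of_eq lA), List.drop_of_length_le (le_of_eq lH),
      List.drop_of_length_le (le_of_eq lB), List.drop_of_length_le (le_of_eq lHb),
      List.drop_of_length_le (le_of_eq lP)]
    simp [List.range', solveLoopB, solveFwdB, hk]
  | succ m ih =>
    intro k ans hkm
    have hkN : k < N := by omega
    have lA : (aaa ++ List.replicate (N - aaa.length) (0 : Int)).length = N := by simp; omega
    have lH : (List.replicate aaa.length true ++ List.replicate (N - aaa.length) false).length = N := by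
      simp; omega
    have lB : (bbb ++ List.replicate (N - bbb.length) (0 : Int)).length = N := by simp; omega
    have lHb : (List.replicate bbb.length true ++ List.replicate (N - bbb.length) false).length = N := by
      simp; omega
    have lP : (peakOf (bbb ++ List.replicate (N - bbb.length) 0)).length = N := by
      rw [peakOf_length, lB]
    have eA := padGet aaa N k hla hkN
    have eHA := flagGet aaa.length N k hla hkN
    have eB := padGet bbb N k hlb hkN
    have eHB := flagGet bbb.length N k hlb hkN
    have eP := peakGet (bbb ++ List.replicate (N - bbb.length) 0) k (by rw [lB]; exact hkN)
    rw [lB] at eP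
    have eBs : (if k + 1 < N then (bbb ++ List.replicate (N - bbb.length) 0).getD (k + 1) 0 else 0)
        = (if k + 1 < bbb.length then bbb.getD (k + 1) 0 else 0) := by
      by_cases h1 : k + 1 < N
      · rw [if_pos h1, padGet bbb N (k + 1) hlb h1]
      · have h2 : ¬ k + 1 < bbb.length := by omega
        rw [if_neg h1, if_neg h2]
    rw [eBs] at eP
    rw [eB] at eP
    rw [List.range'_succ]
    rw [dropD _ k (0 : Int) (by rw [lA]; exact hkN),
      dropD _ k false (by rw [lH]; exact hkN),
      dropD _ k (0 : Int) (by rw [lB]; exact hkN),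
      dropD _ k false (by rw [lHb]; exact hkN),
      dropD _ k false (by rw [lP]; exact hkN)]
    simp only [List.zip_cons_cons]
    simp only [solveLoopB, solveFwdB]
    rw [eA, eHA, eB, eHB, eP]
    have IH := ih (k + 1) -- instantiate later per branch
    have hprev : ∀ ansx : Int,
        solveLoopB aaa bbb (10 ^ 9 + 7) aaa.length bbb.length (List.range' (k + 1) m) ansx
        = solveFwdB (10 ^ 9 + 7)
            (((aaa ++ List.replicate (N - aaa.length) 0).drop (k + 1)).zip
              (((List.replicate aaa.length true ++ List.replicate (N - aaa.length) false).drop (k + 1)).zip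
                (((bbb ++ List.replicate (N - bbb.length) 0).drop (k + 1)).zip
                  (((List.replicate bbb.length true ++ List.replicate (N - bbb.length) false).drop (k + 1)).zip
                    ((peakOf (bbb ++ List.replicate (N - bbb.length) 0)).drop (k + 1)))))) ansx
            ((aaa ++ List.replicate (N - aaa.length) 0).getD k 0) := by
      intro ansx
      have := ih (k + 1) ansx (by omega)
      simpa using this
    -- the threaded prev of the old pass equals the value of a at this position
    have eprev : (if k = 0 then (0 : Int) else (aaa ++ List.replicate (N - aaa.length) 0).getD (k - 1) 0)
        = (if k = 0 then 0 else (if k - 1 < aaa.length then aaa.getD (k - 1) 0 else 0)) := by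
      by_cases h0 : k = 0
      · simp [h0]
      · rw [if_neg h0, if_neg h0, padGet aaa N (k - 1) hla (by omega)]
    rw [eA] at hprev
    simp only [decide_eq_true_eq, ← hprev]
    by_cases hbOk : k < bbb.length
    · by_cases hka : k < aaa.length
      · by_cases hk0 : k = 0
        · subst hk0; simp [eprev, hbOk, hka]
        · have hkm1 : k - 1 < aaa.length := by omega
          have egetprev : (aaa ++ List.replicate (N - aaa.length) (0 : Int)).getD (k - 1) 0
              = aaa.getD (k - 1) 0 := by
            rw [padGet aaa N (k - 1) hla (by omega), if_pos hkm1]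
          have e2 : (aaa ++ List.replicate (N - aaa.length) (0 : Int))[k - 1]? = aaa[k - 1]? :=
            List.getElem?_append_left hkm1
          simp [eprev, hbOk, hka, hk0, hkm1, egetprev, e2]
      · simp [eprev, hbOk, hka]
    · by_cases hka : k < aaa.length
      · by_cases hk0 : k = 0
        · subst hk0; simp [eprev, hbOk, hka]
        · have hkm1 : k - 1 < aaa.length := by omega
          have egetprev : (aaa ++ List.replicate (N - aaa.length) (0 : Int)).getD (k - 1) 0
              = aaa.getD (k - 1) 0 := by
            rw [padGet aaa N (k - 1) hla (by omega), if_pos hkm1]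
          have e2 : (aaa ++ List.replicate (N - aaa.length) (0 : Int))[k - 1]? = aaa[k - 1]? :=
            List.getElem?_append_left hkm1
          simp [eprev, hbOk, hka, hk0, hkm1, egetprev, e2]
      · simp [eprev, hbOk, hka]

-- ===== VERDICT (by name: the statement is the Claim_ definition above) =====
theorem solve_spec : Claim_equal_solve := by
  intro n aaa bbb _ hpre
  obtain ⟨hla, hlb⟩ := hpre
  unfold Spec_solve solve solve_alt
  simp only [PySem.List.pyRepeat_singleton]
  set k := n.toNat - aaa.length with hk
  have e1 : n.toNat = aaa.length + k := by omega
  rw [e1]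
  have L1 := loop1 aaa [] [] 0 k rfl
  simp only [List.length_nil, Nat.cast_zero, List.nil_append] at L1
  rw [L1]
  dsimp only
  set AA := aaa ++ List.replicate k 0 with hAA
  set FX := fixOf 0 aaa ++ List.replicate k false with hFX
  set HA := List.replicate aaa.length true ++ List.replicate k false with hHA
  have hAAlen : AA.length = aaa.length + k := by simp [hAA]
  have hFXfix : FX = fixTag HA AA 0 := fixpad aaa k 0
  have hHAlen : HA.length = AA.length := by simp [hHA, hAAlen]
  have hlbAA : bbb.length ≤ AA.length := by rw [hAAlen]; omega
  have htk : (AA.take bbb.length).length = bbb.length := by rw [List.length_take]; omega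
  have htkF : (FX.take bbb.length).length = bbb.length := by
    rw [List.length_take, hFXfix]
    have : (fixTag HA AA 0).length = FX.length := by rw [hFXfix]
    rw [this]
    have : FX.length = aaa.length + k := by simp [hFX, length_fixOf]
    omega
  conv_lhs => rw [show AA = AA.take bbb.length ++ AA.drop bbb.length from (List.take_append_drop _ _).symm,
    show FX = FX.take bbb.length ++ FX.drop bbb.length from (List.take_append_drop _ _).symm]
  rw [loop2 bbb (AA.take bbb.length) (AA.drop bbb.length) (FX.take bbb.length)
    (FX.drop bbb.length) 0 htk htkF]
  have ME := mainEquiv AA HA bbb 0 1 hHAlen hlbAA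
  rw [← hFXfix, hAAlen] at ME
  have BR := bridge aaa bbb (aaa.length + k) (by omega) (by omega) (aaa.length + k) 0 1 (by omega)
  rw [show List.range' 0 (aaa.length + k) = List.range (aaa.length + k) from List.range_eq_range'.symm] at BR
  simp only [List.drop_zero, if_pos rfl, if_true, Nat.add_sub_cancel_left] at BR
  rw [BR]
  simp only [hAA, hHA] at ME
  simp only [hAA, hFX]
  rw [← ME]
  cases h3 : chainH ((aaa ++ List.replicate k 0).take bbb.length)
      ((fixOf 0 aaa ++ List.replicate k false).take bbb.length) bbb 0 with
  | none => rfl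
  | some q => cases q; rfl
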